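-- pv_equiv track=rewrite | github.com/harbor-s/dsc80-sp20 | labs/lab01/lab01.py | same_diff_ints
-- ===== SOURCE A (Python) =====
-- def same_diff_ints(ints):
--     """
--     same_diff_ints tests whether a list contains
--     two list elements i places apart, whose distance
--     as integers is also i.
--
--     :param ints: a list of integers
--     :returns: a boolean value if ints contains two
--     elements as described above.
--
--     :Example:
--     >>> same_diff_ints([5,3,1,5,9,8])
--     True
--     >>> same_diff_ints([1,3,5,7,9])
--     False
--     """
--
--     if len(ints) == 0:
--         return False
--
--     for d in range(1,len(ints)):
--         for k in range(len(ints) - d):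
--             diff = abs(ints[k] - ints[k+d])
--             if diff == d:
--                 return True
--
--     return False
-- ===== SOURCE B (Python) =====
-- def same_diff_ints(ints):
--     # One pass: |a_i - a_j| == j - i  iff  a_i - i == a_j - j  or  a_i + i == a_j + j.
--     minus = set()
--     plus = set()
--     for j, v in enumerate(ints):
--         if v - j in minus or v + j in plus:
--             return True
--         minus.add(v - j)
--         plus.add(v + j)
--     return False
-- ===== Notes on version B (the rewrite author's own statement) =====
-- stated objective: faster
-- what changed: Replaces the quadratic all-pairs scan with one pass that stores a_j - j and a_j + j in two hash sets and reports a collision.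
import Mathlib
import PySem

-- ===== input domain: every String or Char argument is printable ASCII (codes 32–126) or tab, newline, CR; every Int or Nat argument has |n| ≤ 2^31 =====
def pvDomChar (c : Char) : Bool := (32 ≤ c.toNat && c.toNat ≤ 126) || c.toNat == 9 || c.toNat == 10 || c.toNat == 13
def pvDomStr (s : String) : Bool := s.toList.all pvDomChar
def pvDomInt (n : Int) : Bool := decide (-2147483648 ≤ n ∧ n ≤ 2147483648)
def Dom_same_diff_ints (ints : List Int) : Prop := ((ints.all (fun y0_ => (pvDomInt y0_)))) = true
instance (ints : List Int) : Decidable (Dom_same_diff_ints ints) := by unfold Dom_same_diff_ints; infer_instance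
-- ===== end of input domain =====

-- B replaces A's quadratic all-pairs scan with one pass storing a_j - j and a_j + j in two sets.

-- ===== PORT A =====
-- the nested early-return loops become nested List.any over the same ranges
def same_diff_ints (ints : List Int) : Bool :=
  if ints.length = 0 then false
  else
    (PySem.List.pyRange 1 (ints.length : Int) 1).any (fun d =>
      (PySem.List.pyRange 0 ((ints.length : Int) - d) 1).any (fun k =>
        ((PySem.List.pyGetD ints k 0 - PySem.List.pyGetD ints (k + d) 0).natAbs : Int) == d))

-- ===== PORT B =====
-- the 'for j, v in enumerate(ints)' loop with early return, carrying the two sets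
def sdiGo : List (Int × Int) → PySem.Set Int → PySem.Set Int → Bool
  | [], _, _ => false
  | (j, v) :: rest, minus, plus =>
    if PySem.Set.contains minus (v - j) || PySem.Set.contains plus (v + j) then true
    else sdiGo rest (PySem.Set.add minus (v - j)) (PySem.Set.add plus (v + j))

def same_diff_ints_alt (ints : List Int) : Bool :=
  sdiGo (PySem.List.enumerate ints 0) PySem.Set.empty PySem.Set.empty

-- ===== PRECONDITION & SPEC =====
def Spec_same_diff_ints (ints : List Int) (out : Bool) : Prop := out = same_diff_ints_alt ints
instance (ints : List Int) (out : Bool) : Decidable (Spec_same_diff_ints ints out) := by unfold Spec_same_diff_ints; infer_instance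

-- ===== CLAIM (what is proved, stated in full; the proofs are below) =====
def Claim_equal_same_diff_ints : Prop := ∀ (ints : List Int), Dom_same_diff_ints ints → Spec_same_diff_ints ints (same_diff_ints ints)

-- ===== LEMMAS AND PROOFS =====

-- the common content of both programs: a pair i < j < n whose values collide on a - i or a + i
-- (|a_i - a_j| = j - i  ↔  a_i - i = a_j - j ∨ a_i + i = a_j + j)
def sdiPair (ints : List Int) : Prop :=
  ∃ i j : Nat, i < j ∧ j < ints.length ∧
    (ints.getD i 0 - i = ints.getD j 0 - j ∨ ints.getD i 0 + i = ints.getD j 0 + j)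

-- loop invariant of B: a hit is either a collision with the pre-seeded sets or an in-list pair
lemma go_iff : ∀ (xs : List Int) (s : Int) (M P : PySem.Set Int),
    sdiGo (PySem.List.enumerate xs s) M P = true ↔
      ((∃ j : Nat, j < xs.length ∧
          (xs.getD j 0 - (s + j) ∈ M ∨ xs.getD j 0 + (s + j) ∈ P)) ∨
        (∃ i j : Nat, i < j ∧ j < xs.length ∧
          (xs.getD i 0 - i = xs.getD j 0 - j ∨ xs.getD i 0 + i = xs.getD j 0 + j))) := by
  intro xs
  induction xs with
  | nil => intro s M P; simp [sdiGo, PySem.List.enumerate]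
  | cons x xs ih =>
    intro s M P
    rw [PySem.List.enumerate_cons]
    show (if PySem.Set.contains M (x - s) || PySem.Set.contains P (x + s) then true
          else sdiGo (PySem.List.enumerate xs (s+1)) (PySem.Set.add M (x - s)) (PySem.Set.add P (x + s))) = true ↔ _
    by_cases hc : (PySem.Set.contains M (x - s) || PySem.Set.contains P (x + s)) = true
    · rw [if_pos hc]
      simp only [true_iff]
      rcases Bool.or_eq_true_iff.1 hc with h | h
      · left
        refine ⟨0, Nat.succ_pos _, Or.inl ?_⟩
        have : x - (s + ((0:Nat):Int)) = x - s := by push_cast; ring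
        rw [List.getD_cons_zero, this]
        simpa [PySem.Set.contains] using h
      · left
        refine ⟨0, Nat.succ_pos _, Or.inr ?_⟩
        have : x + (s + ((0:Nat):Int)) = x + s := by push_cast; ring
        rw [List.getD_cons_zero, this]
        simpa [PySem.Set.contains] using h
    · rw [if_neg hc]
      have hM : x - s ∉ M := by
        intro h; apply hc; exact Bool.or_eq_true_iff.2 (Or.inl (by simpa [PySem.Set.contains] using h))
      have hP : x + s ∉ P := by
        intro h; apply hc; exact Bool.or_eq_true_iff.2 (Or.inr (by simpa [PySem.Set.contains] using h))
      rw [ih]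
      constructor
      · rintro (⟨j, hj, h | h⟩ | ⟨i, j, hij, hj, h⟩)
        · rcases (PySem.Set.mem_add M (x - s) _).1 h with hmem | heq
          · left
            refine ⟨j + 1, Nat.succ_lt_succ hj, Or.inl ?_⟩
            rw [List.getD_cons_succ]
            convert hmem using 2
            push_cast; ring
          · right
            refine ⟨0, j + 1, Nat.succ_pos _, Nat.succ_lt_succ hj, Or.inl ?_⟩
            rw [List.getD_cons_zero, List.getD_cons_succ]
            push_cast at heq ⊢; omega
        · rcases (PySem.Set.mem_add P (x + s) _).1 h with hmem | heq
          · left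
            refine ⟨j + 1, Nat.succ_lt_succ hj, Or.inr ?_⟩
            rw [List.getD_cons_succ]
            convert hmem using 2
            push_cast; ring
          · right
            refine ⟨0, j + 1, Nat.succ_pos _, Nat.succ_lt_succ hj, Or.inr ?_⟩
            rw [List.getD_cons_zero, List.getD_cons_succ]
            push_cast at heq ⊢; omega
        · right
          refine ⟨i + 1, j + 1, Nat.succ_lt_succ hij, Nat.succ_lt_succ hj, ?_⟩
          rw [List.getD_cons_succ, List.getD_cons_succ]
          push_cast at h ⊢; omega
      · rintro (⟨j, hj, h⟩ | ⟨i, j, hij, hj, h⟩)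
        · match j, hj, h with
          | 0, _, h =>
            exfalso
            rcases h with h | h
            · apply hM; rw [List.getD_cons_zero] at h
              convert h using 2; push_cast; ring
            · apply hP; rw [List.getD_cons_zero] at h
              convert h using 2; push_cast; ring
          | j' + 1, hj, h =>
            left
            refine ⟨j', Nat.lt_of_succ_lt_succ hj, ?_⟩
            rw [List.getD_cons_succ] at h
            rcases h with h | h
            · refine Or.inl ((PySem.Set.mem_add M (x - s) _).2 (Or.inl ?_))
              convert h using 2; push_cast; ring
            · refine Or.inr ((PySem.Set.mem_add P (x + s) _).2 (Or.inl ?_))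
              convert h using 2; push_cast; ring
        · match i, j, hij, hj, h with
          | 0, j' + 1, _, hj, h =>
            left
            refine ⟨j', Nat.lt_of_succ_lt_succ hj, ?_⟩
            rw [List.getD_cons_zero, List.getD_cons_succ] at h
            rcases h with h | h
            · refine Or.inl ((PySem.Set.mem_add M (x - s) _).2 (Or.inr ?_))
              push_cast at h ⊢; omega
            · refine Or.inr ((PySem.Set.mem_add P (x + s) _).2 (Or.inr ?_))
              push_cast at h ⊢; omega
          | i' + 1, j' + 1, hij, hj, h =>
            right
            refine ⟨i', j', Nat.lt_of_succ_lt_succ hij, Nat.lt_of_succ_lt_succ hj, ?_⟩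
            rw [List.getD_cons_succ, List.getD_cons_succ] at h
            push_cast at h ⊢; omega

lemma a_iff (ints : List Int) : same_diff_ints ints = true ↔ sdiPair ints := by
  unfold same_diff_ints sdiPair
  split
  · rename_i h
    simp [h]
  · simp only [List.any_eq_true, PySem.List.mem_pyRange_one, beq_iff_eq]
    constructor
    · rintro ⟨d, ⟨hd1, hd2⟩, k, ⟨hk1, hk2⟩, hcond⟩
      refine ⟨k.toNat, (k + d).toNat, ?_, ?_, ?_⟩
      · omega
      · omega
      · rw [PySem.List.pyGetD_of_nonneg ints 0 hk1, PySem.List.pyGetD_of_nonneg ints 0 (by omega : (0:Int) ≤ k + d)] at hcond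
        rw [Int.toNat_of_nonneg hk1, Int.toNat_of_nonneg (by omega : (0:Int) ≤ k + d)]
        omega
    · rintro ⟨i, j, hij, hj, hcond⟩
      refine ⟨(j : Int) - i, ⟨by omega, by omega⟩, (i : Int), ⟨by omega, by omega⟩, ?_⟩
      have h1 : PySem.List.pyGetD ints (i : Int) 0 = ints.getD i 0 := by
        rw [PySem.List.pyGetD_natCast]
      have h2 : PySem.List.pyGetD ints ((i : Int) + ((j : Int) - i)) 0 = ints.getD j 0 := by
        rw [PySem.List.pyGetD_of_nonneg ints 0 (by omega)]
        congr 1; omega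
      rw [h1, h2]
      omega

lemma b_iff (ints : List Int) : same_diff_ints_alt ints = true ↔ sdiPair ints := by
  unfold same_diff_ints_alt sdiPair
  rw [go_iff]
  simp [PySem.Set.empty]

-- ===== VERDICT (by name: the statement is the Claim_ definition above) =====
theorem same_diff_ints_spec : Claim_equal_same_diff_ints := by
  intro ints _
  unfold Spec_same_diff_ints
  have ha := a_iff ints
  have hb := b_iff ints
  cases h1 : same_diff_ints ints <;> cases h2 : same_diff_ints_alt ints <;>
    simp_all
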